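-- pv_equiv track=rewrite | github.com/spacecat2002/relayserve | distributed_inference/backends/cgroup_utils.py | format_cpu_list
-- ===== SOURCE A (Python) =====
-- def format_cpu_list(cpu_list: list) -> str:
--     """
--     将 CPU 列表格式化为 cgroup 格式。
--
--     Args:
--         cpu_list: 排序后的 CPU 列表，例如 [0, 1, 2, 32, 33, 34]
--
--     Returns:
--         格式化的字符串，例如 "0-2,32-34"
--     """
--     if not cpu_list:
--         return ""
--
--     ranges = []
--     start = cpu_list[0]
--     end = cpu_list[0]
--
--     for cpu in cpu_list[1:]:
--         if cpu == end + 1: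
--             end = cpu
--         else:
--             if start == end:
--                 ranges.append(str(start))
--             else:
--                 ranges.append(f"{start}-{end}")
--             start = cpu
--             end = cpu
--
--     # 添加最后一个范围
--     if start == end:
--         ranges.append(str(start))
--     else:
--         ranges.append(f"{start}-{end}")
--
--     return ",".join(ranges)
-- ===== SOURCE B (Python) =====
-- def format_cpu_list(cpu_list: list) -> str:
--     """Mask-based formulation: flag run starts with the index-minus-value key
--     (key i - v is constant exactly on a maximal consecutive run), then select
--     run heads and run tails by parallel zips with the boolean mask."""
--     keys = [i - v for i, v in enumerate(cpu_list)]
--     starts = [True] + [p != q for p, q in zip(keys, keys[1:])]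
--     firsts = [v for v, s in zip(cpu_list, starts) if s]
--     lasts = [v for v, s in zip(cpu_list, starts[1:] + [True]) if s]
--     return ",".join(str(a) if a == b else f"{a}-{b}" for a, b in zip(firsts, lasts))
-- ===== Notes on version B (the rewrite author's own statement) =====
-- stated objective: alternative
-- what changed: Replaces A's fused start/end state machine with a mask-based pipeline: compute index-minus-value keys (constant exactly on a consecutive run), derive a boolean run-start mask, select run heads and run tails by parallel zips against the mask, and format the zipped pairs.
import Mathlib
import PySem

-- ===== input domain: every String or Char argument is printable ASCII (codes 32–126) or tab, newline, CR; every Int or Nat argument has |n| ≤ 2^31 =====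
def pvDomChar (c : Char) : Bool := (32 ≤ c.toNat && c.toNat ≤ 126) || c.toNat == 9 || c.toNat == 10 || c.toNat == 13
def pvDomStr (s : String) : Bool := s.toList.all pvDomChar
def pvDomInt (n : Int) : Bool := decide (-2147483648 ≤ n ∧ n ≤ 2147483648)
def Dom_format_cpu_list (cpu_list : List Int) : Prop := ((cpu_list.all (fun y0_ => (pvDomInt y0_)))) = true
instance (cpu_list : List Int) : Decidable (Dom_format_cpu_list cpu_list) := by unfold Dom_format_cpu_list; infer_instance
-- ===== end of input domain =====

-- B is an alternative mask-based formulation (run-start mask from index-minus-value keys); same O(n) cost.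

-- shared piece formatter: `str(a)` if a == b else f"{a}-{b}" (textually identical in both Pythons)
def fmtRange (s e : Int) : String :=
  if s = e then PySem.Int.toStr s else PySem.Int.toStr s ++ "-" ++ PySem.Int.toStr e

-- ===== PORT A =====
-- A: fused fold carrying (ranges, start, end); on a break emit the pending range, flush at the end.
def format_cpu_list (cpu_list : List Int) : String :=
  match cpu_list with
  | [] => ""
  | c0 :: rest =>
    let st : List String × Int × Int :=
      rest.foldl (fun acc cpu =>
        let (ranges, s, e) := acc
        if cpu = e + 1 then (ranges, s, cpu)
        else (ranges ++ [fmtRange s e], cpu, cpu)) ([], c0, c0)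
    PySem.Str.join "," (st.1 ++ [fmtRange st.2.1 st.2.2])

-- ===== PORT B =====
-- B: keys = [i - v for i, v in enumerate(cpu_list)]; starts mask; firsts/lasts selected by zips.
-- (Python's `keys[1:]` / `starts[1:]` are ported as PySem.List.slice · (some 1) none.)
def format_cpu_list_alt (cpu_list : List Int) : String :=
  let keys : List Int := (PySem.List.enumerate cpu_list).map (fun p => p.1 - p.2)
  let starts : List Bool :=
    true :: (keys.zip (PySem.List.slice keys (some 1) none)).map (fun pq => pq.1 != pq.2)
  let firsts : List Int := ((cpu_list.zip starts).filter (fun vs => vs.2)).map (fun vs => vs.1)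
  let lasts : List Int :=
    ((cpu_list.zip (PySem.List.slice starts (some 1) none ++ [true])).filter (fun vs => vs.2)).map (fun vs => vs.1)
  PySem.Str.join "," ((firsts.zip lasts).map (fun ab => fmtRange ab.1 ab.2))

-- ===== PRECONDITION & SPEC =====
def Spec_format_cpu_list (cpu_list : List Int) (out : String) : Prop := out = format_cpu_list_alt cpu_list
instance (cpu_list : List Int) (out : String) : Decidable (Spec_format_cpu_list cpu_list out) := by unfold Spec_format_cpu_list; infer_instance

-- ===== CLAIM (what is proved, stated in full; the proofs are below) =====
def Claim_equal_format_cpu_list : Prop := ∀ (cpu_list : List Int), Dom_format_cpu_list cpu_list → Spec_format_cpu_list cpu_list (format_cpu_list cpu_list)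

-- ===== LEMMAS AND PROOFS =====

-- the successor-break mask of a list: entry j is true iff xs[j+1] ≠ xs[j] + 1
def sflags : List Int → List Bool
  | x :: y :: t => (!(y == x + 1)) :: sflags (y :: t)
  | _ => []

theorem sflags_nil : sflags [] = [] := rfl
theorem sflags_single (x : Int) : sflags [x] = [] := rfl
theorem sflags_cons₂ (x y : Int) (t : List Int) :
    sflags (x :: y :: t) = (!(y == x + 1)) :: sflags (y :: t) := rfl

-- B's key mask equals the successor-break mask (keys i-v equal ⟺ consecutive values are successors)
theorem keys_mask_eq_sflags (xs : List Int) (i : Int) :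
    (((PySem.List.enumerate xs i).map (fun p => p.1 - p.2)).zip
      (((PySem.List.enumerate xs i).map (fun p => p.1 - p.2)).tail)).map (fun pq => pq.1 != pq.2)
    = sflags xs := by
  induction xs generalizing i with
  | nil => simp [PySem.List.enumerate_nil, sflags_nil]
  | cons x t ih =>
    cases t with
    | nil => simp [PySem.List.enumerate_cons, PySem.List.enumerate_nil, sflags_single]
    | cons y t' =>
      have h := ih (i := i + 1)
      simp only [PySem.List.enumerate_cons, List.map_cons, List.tail_cons, List.zip_cons_cons,
        List.map_cons, sflags_cons₂] at *
      refine congrArg₂ _ ?_ h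
      have : (i - x = i + 1 - y) ↔ (y = x + 1) := by omega
      by_cases hc : y = x + 1 <;> simp [bne, this, hc]

-- run heads among `l` given predecessor `prev`
def tailFirsts (prev : Int) : List Int → List Int
  | [] => []
  | y :: t => (if y = prev + 1 then ([] : List Int) else [y]) ++ tailFirsts y t

-- run tails of `prev :: l`
def lastsAux (prev : Int) : List Int → List Int
  | [] => [prev]
  | y :: t => (if y = prev + 1 then ([] : List Int) else [prev]) ++ lastsAux y t

theorem firsts_eq_tailFirsts (prev : Int) (l : List Int) :
    ((l.zip (sflags (prev :: l))).filter (fun vs => vs.2)).map (fun vs => vs.1)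
    = tailFirsts prev l := by
  induction l generalizing prev with
  | nil => simp [tailFirsts]
  | cons y t ih =>
    rw [sflags_cons₂]
    by_cases hc : y = prev + 1
    · subst hc; simpa [tailFirsts] using ih (prev + 1)
    · simp [List.zip_cons_cons, hc, tailFirsts, ih y]

theorem lasts_eq_lastsAux (prev : Int) (l : List Int) :
    (((prev :: l).zip (sflags (prev :: l) ++ [true])).filter (fun vs => vs.2)).map (fun vs => vs.1)
    = lastsAux prev l := by
  induction l generalizing prev with
  | nil => simp [sflags_single, lastsAux]
  | cons y t ih =>
    rw [sflags_cons₂]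
    by_cases hc : y = prev + 1
    · subst hc; simpa [lastsAux] using ih (prev + 1)
    · simp [List.zip_cons_cons, hc, lastsAux, ih y]

-- A's loop rewritten acc-free: pieces produced from state (s, e) over remaining list l, with trailing flush
def loopA (s e : Int) : List Int → List String
  | [] => [fmtRange s e]
  | c :: t => if c = e + 1 then loopA s c t else fmtRange s e :: loopA c c t

theorem foldA_eq_loopA (l : List Int) (acc : List String) (s e : Int) :
    (let st := l.foldl (fun acc cpu =>
        let (ranges, s, e) := acc
        if cpu = e + 1 then (ranges, s, cpu)
        else (ranges ++ [fmtRange s e], cpu, cpu)) (acc, s, e)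
     st.1 ++ [fmtRange st.2.1 st.2.2]) = acc ++ loopA s e l := by
  induction l generalizing acc s e with
  | nil => simp [loopA]
  | cons c t ih =>
    simp only [List.foldl_cons, loopA]
    split
    · exact ih acc s c
    · rw [ih (acc ++ [fmtRange s e]) c c]; simp

-- A's pieces = fmt over (run heads, run tails) pairs
theorem loopA_eq_zip (l : List Int) (s e : Int) :
    loopA s e l = ((s :: tailFirsts e l).zip (lastsAux e l)).map (fun ab => fmtRange ab.1 ab.2) := by
  induction l generalizing s e with
  | nil => simp [loopA, tailFirsts, lastsAux]
  | cons c t ih =>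
    simp only [loopA, tailFirsts, lastsAux]
    split
    · exact ih s c
    · simp only [List.cons_append, List.zip_cons_cons, List.map_cons]
      rw [ih c c]
      simp

-- ===== VERDICT (by name: the statement is the Claim_ definition above) =====
theorem format_cpu_list_spec : Claim_equal_format_cpu_list := by
  intro cpu_list _
  unfold Spec_format_cpu_list format_cpu_list format_cpu_list_alt
  match cpu_list with
  | [] => simp [PySem.List.enumerate_nil, PySem.Str.join]
  | c0 :: rest =>
    simp only [PySem.List.slice_from_one]
    rw [keys_mask_eq_sflags (c0 :: rest) 0]
    rw [foldA_eq_loopA rest [] c0 c0, List.nil_append, loopA_eq_zip]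
    have hf : (((c0 :: rest).zip (true :: sflags (c0 :: rest))).filter (fun vs => vs.2)).map
        (fun vs => vs.1) = c0 :: tailFirsts c0 rest := by
      cases rest with
      | nil => simp [sflags_single, tailFirsts]
      | cons y t =>
        have h := firsts_eq_tailFirsts c0 (y :: t)
        rw [sflags_cons₂] at h ⊢
        simp only [List.zip_cons_cons, List.filter_cons] at h ⊢
        simpa [sflags_cons₂] using h
    rw [hf, List.tail_cons, lasts_eq_lastsAux]
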